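-- pv_equiv track=rewrite | github.com/viroovr/baekjoon | Platinum/Platinum V/1981.py | bfs
-- ===== SOURCE A (Python) =====
-- from collections import deque
--
-- directions = [(-1, 0), (1, 0), (0, 1), (0, -1)]
--
-- def bfs(n, arr, min_val, max_val):
--     if not ((min_val <= arr[0][0] <= max_val) and (min_val <= arr[-1][-1] <= max_val)):
--         return False
--     visited = [[False] * n for _ in range(n)]
--     q = deque([(0, 0)])
--     visited[0][0] = True
--
--     while q:
--         r, c = q.popleft()
--         if (r, c) == (n - 1, n - 1):
--             return True
--         for dr, dc in directions:
--             nr, nc = r + dr, c + dc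
--             if 0 <= nr < n and 0 <= nc < n and not visited[nr][nc] and min_val <= arr[nr][nc] <= max_val:
--                 q.append((nr, nc))
--                 visited[nr][nc] = True
--
--     return False
-- ===== SOURCE B (Python) =====
-- def bfs(n, arr, min_val, max_val):
--     # Round-based saturation: grow the reachable set by whole-grid sweeps until
--     # it stops changing, then test membership of the goal cell.
--     if not ((min_val <= arr[0][0] <= max_val) and (min_val <= arr[-1][-1] <= max_val)):
--         return False
--     reach = {(0, 0)}
--     while True:
--         added = {(r, c) for r in range(n) for c in range(n)
--                  if (r, c) not in reach
--                  and min_val <= arr[r][c] <= max_val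
--                  and ((r, c - 1) in reach or (r, c + 1) in reach
--                       or (r - 1, c) in reach or (r + 1, c) in reach)}
--         if not added:
--             return (n - 1, n - 1) in reach
--         reach |= added
-- ===== Notes on version B (the rewrite author's own statement) =====
-- stated objective: alternative
-- what changed: Replaces the deque-based single-source BFS with a queue and per-cell visited matrix by round-based set saturation: repeated whole-grid sweeps that add every in-range cell adjacent to the current reachable set until a fixpoint, then a membership test of the goal cell.
-- outside the precondition, e.g. on bfs(3, [[3, -3], [-3, 2]], -1, 3): A returns False, B raises IndexError
import Mathlib
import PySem

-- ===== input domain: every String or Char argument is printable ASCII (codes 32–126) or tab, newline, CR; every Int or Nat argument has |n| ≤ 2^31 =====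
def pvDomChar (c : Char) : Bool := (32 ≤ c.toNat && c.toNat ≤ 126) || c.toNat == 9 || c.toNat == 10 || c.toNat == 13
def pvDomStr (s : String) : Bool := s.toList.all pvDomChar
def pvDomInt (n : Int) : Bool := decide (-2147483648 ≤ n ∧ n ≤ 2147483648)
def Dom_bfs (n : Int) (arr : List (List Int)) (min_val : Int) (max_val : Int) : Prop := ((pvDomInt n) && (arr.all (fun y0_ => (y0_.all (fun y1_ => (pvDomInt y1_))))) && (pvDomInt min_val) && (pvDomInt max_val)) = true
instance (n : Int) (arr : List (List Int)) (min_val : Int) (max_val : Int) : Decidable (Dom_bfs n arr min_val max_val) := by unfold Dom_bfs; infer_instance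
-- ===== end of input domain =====

-- B replaces A's deque-based BFS by round-based set saturation (whole-grid sweeps
-- to a fixpoint, then a membership test); objective: alternative algorithm, same result.

-- ===== PORT A =====
-- arr[r][c]; exact whenever the indices are in range (guaranteed inside Pre_bfs for
-- the accesses both programs perform; Python raises outside, excluded by Pre_bfs).
def pvVal (arr : List (List Int)) (r c : Int) : Int :=
  PySem.List.pyGetD (PySem.List.pyGetD arr r []) c 0

def dirsA : List (Int × Int) := [(-1, 0), (1, 0), (0, 1), (0, -1)]

def stepA (n : Int) (arr : List (List Int)) (mn mx : Int) (x : Int × Int)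
    (s : List (Int × Int) × List (Int × Int)) (d : Int × Int) :
    List (Int × Int) × List (Int × Int) :=
  if 0 ≤ x.1 + d.1 ∧ x.1 + d.1 < n ∧ 0 ≤ x.2 + d.2 ∧ x.2 + d.2 < n ∧
      (x.1 + d.1, x.2 + d.2) ∉ s.2 ∧
      mn ≤ pvVal arr (x.1 + d.1) (x.2 + d.2) ∧ pvVal arr (x.1 + d.1) (x.2 + d.2) ≤ mx then
    (s.1 ++ [(x.1 + d.1, x.2 + d.2)], s.2 ++ [(x.1 + d.1, x.2 + d.2)])
  else s

-- the while loop; the fuel n.toNat*n.toNat+1 only makes the recursion structural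
-- (at most one pop per enqueue, at most n*n enqueues), it never cuts the loop short.
def loopA (n : Int) (arr : List (List Int)) (mn mx : Int) :
    Nat → List (Int × Int) → List (Int × Int) → Bool
  | 0, _, _ => false
  | _ + 1, [], _ => false
  | f + 1, x :: q, v =>
    if x = (n - 1, n - 1) then true
    else
      loopA n arr mn mx f (dirsA.foldl (stepA n arr mn mx x) (q, v)).1
        (dirsA.foldl (stepA n arr mn mx x) (q, v)).2

def bfs (n : Int) (arr : List (List Int)) (min_val : Int) (max_val : Int) : Bool :=
  if (min_val ≤ pvVal arr 0 0 ∧ pvVal arr 0 0 ≤ max_val) ∧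
      (min_val ≤ pvVal arr (-1) (-1) ∧ pvVal arr (-1) (-1) ≤ max_val) then
    loopA n arr min_val max_val (n.toNat * n.toNat + 1) [(0, 0)] [(0, 0)]
  else false

-- ===== PORT B =====
def cellsB (n : Int) : List (Int × Int) :=
  (PySem.List.pyRange 0 n 1).flatMap (fun r => (PySem.List.pyRange 0 n 1).map (fun c => (r, c)))

def addedB (n : Int) (arr : List (List Int)) (mn mx : Int) (reach : List (Int × Int)) :
    List (Int × Int) :=
  (cellsB n).filter (fun p =>
    decide (p ∉ reach ∧ (mn ≤ pvVal arr p.1 p.2 ∧ pvVal arr p.1 p.2 ≤ mx) ∧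
      ((p.1, p.2 - 1) ∈ reach ∨ (p.1, p.2 + 1) ∈ reach ∨
       (p.1 - 1, p.2) ∈ reach ∨ (p.1 + 1, p.2) ∈ reach)))

-- the while True loop; fuel n.toNat*n.toNat+1 suffices: every round before the
-- fixpoint adds at least one of the n*n cells.
def loopB (n : Int) (arr : List (List Int)) (mn mx : Int) :
    Nat → List (Int × Int) → List (Int × Int)
  | 0, reach => reach
  | f + 1, reach =>
    if addedB n arr mn mx reach = [] then reach
    else loopB n arr mn mx f (reach ++ addedB n arr mn mx reach)

def bfs_alt (n : Int) (arr : List (List Int)) (min_val : Int) (max_val : Int) : Bool :=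
  if (min_val ≤ pvVal arr 0 0 ∧ pvVal arr 0 0 ≤ max_val) ∧
      (min_val ≤ pvVal arr (-1) (-1) ∧ pvVal arr (-1) (-1) ≤ max_val) then
    decide ((n - 1, n - 1) ∈ loopB n arr min_val max_val (n.toNat * n.toNat + 1) [(0, 0)])
  else false

-- ===== PRECONDITION & SPEC =====
-- Pre_ admits grids covering the whole n×n search region (n ≥ 1) and any input whose
-- endpoint guard fails (there A returns False before the grid shape matters); it
-- excludes grids passing the guard but missing part of the region: there A raises
-- IndexError as soon as its search touches a missing cell (and returns only when it
-- happens not to), while B's whole-grid sweep always touches one and raises.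
def Pre_bfs (n : Int) (arr : List (List Int)) (min_val : Int) (max_val : Int) : Prop :=
  (1 ≤ n ∧ n ≤ (arr.length : Int) ∧ ∀ row ∈ arr, n ≤ (row.length : Int)) ∨
  (arr ≠ [] ∧ arr.headD [] ≠ [] ∧
    (¬(min_val ≤ (arr.headD []).headD 0 ∧ (arr.headD []).headD 0 ≤ max_val) ∨
     (arr.getLast?.getD [] ≠ [] ∧
      ¬(min_val ≤ (arr.getLast?.getD []).getLast?.getD 0 ∧
        (arr.getLast?.getD []).getLast?.getD 0 ≤ max_val))))
instance (n : Int) (arr : List (List Int)) (min_val : Int) (max_val : Int) : Decidable (Pre_bfs n arr min_val max_val) := by unfold Pre_bfs; infer_instance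

def pvWitness_bfs : Int × List (List Int) × Int × Int := (2, [[1, 2], [3, 4]], 1, 4)

def Spec_bfs (n : Int) (arr : List (List Int)) (min_val : Int) (max_val : Int) (out : Bool) : Prop := out = bfs_alt n arr min_val max_val
instance (n : Int) (arr : List (List Int)) (min_val : Int) (max_val : Int) (out : Bool) : Decidable (Spec_bfs n arr min_val max_val out) := by unfold Spec_bfs; infer_instance

-- ===== CLAIM (what is proved, stated in full; the proofs are below) =====
def Claim_equal_bfs : Prop := ∀ (n : Int) (arr : List (List Int)) (min_val : Int) (max_val : Int), Dom_bfs n arr min_val max_val → Pre_bfs n arr min_val max_val → Spec_bfs n arr min_val max_val (bfs n arr min_val max_val)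

-- ===== LEMMAS AND PROOFS =====

-- a cell is inside the n×n grid and its value is within [mn, mx]
def okCell (n : Int) (arr : List (List Int)) (mn mx : Int) (p : Int × Int) : Prop :=
  0 ≤ p.1 ∧ p.1 < n ∧ 0 ≤ p.2 ∧ p.2 < n ∧ mn ≤ pvVal arr p.1 p.2 ∧ pvVal arr p.1 p.2 ≤ mx

def AdjP (p q : Int × Int) : Prop := ∃ d ∈ dirsA, q = (p.1 + d.1, p.2 + d.2)

-- cells reachable from (0,0) stepping onto ok cells
inductive ReachP (n : Int) (arr : List (List Int)) (mn mx : Int) : Int × Int → Prop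
  | start : ReachP n arr mn mx (0, 0)
  | step {p q : Int × Int} : ReachP n arr mn mx p → AdjP p q → okCell n arr mn mx q →
      ReachP n arr mn mx q

lemma mem_cellsB {n : Int} {p : Int × Int} :
    p ∈ cellsB n ↔ 0 ≤ p.1 ∧ p.1 < n ∧ 0 ≤ p.2 ∧ p.2 < n := by
  simp only [cellsB, List.mem_flatMap, List.mem_map, PySem.List.mem_pyRange_one]
  constructor
  · rintro ⟨r, hr, c, hc, rfl⟩; exact ⟨hr.1, hr.2, hc.1, hc.2⟩
  · rintro ⟨h1, h2, h3, h4⟩; exact ⟨p.1, ⟨h1, h2⟩, p.2, ⟨h3, h4⟩, rfl⟩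

lemma length_cellsB (n : Int) : (cellsB n).length = n.toNat * n.toNat := by
  simp [cellsB, List.length_flatMap, PySem.List.length_pyRange_one, List.map_const',
    List.sum_replicate]

-- number of grid cells not yet recorded
def mA (n : Int) (v : List (Int × Int)) : Nat := ((cellsB n).toFinset \ v.toFinset).card

lemma mA_le (n : Int) (v : List (Int × Int)) : mA n v ≤ n.toNat * n.toNat := by
  calc ((cellsB n).toFinset \ v.toFinset).card ≤ (cellsB n).toFinset.card :=
        Finset.card_le_card (Finset.sdiff_subset)
    _ ≤ (cellsB n).length := List.toFinset_card_le _
    _ = n.toNat * n.toNat := length_cellsB n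

lemma mA_append {n : Int} {v L : List (Int × Int)} (hnd : L.Nodup)
    (hdisj : ∀ p ∈ L, p ∉ v) (hsub : ∀ p ∈ L, p ∈ cellsB n) :
    mA n (v ++ L) + L.length = mA n v := by
  have h1 : (cellsB n).toFinset \ (v ++ L).toFinset
      = ((cellsB n).toFinset \ v.toFinset) \ L.toFinset := by
    ext x; simp; tauto
  have h2 : L.toFinset ⊆ (cellsB n).toFinset \ v.toFinset := by
    intro x hx
    simp only [List.mem_toFinset] at hx
    simp only [Finset.mem_sdiff, List.mem_toFinset]
    exact ⟨hsub x hx, hdisj x hx⟩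
  have h4 := Finset.card_sdiff_add_card_eq_card h2
  rw [List.toFinset_card_of_nodup hnd] at h4
  rw [mA, mA, h1]
  exact h4

lemma foldA_spec (n : Int) (arr : List (List Int)) (mn mx : Int) (x : Int × Int) :
    ∀ (ds : List (Int × Int)) (q v : List (Int × Int)),
    ∃ L, ds.foldl (stepA n arr mn mx x) (q, v) = (q ++ L, v ++ L) ∧ L.Nodup ∧
      (∀ p ∈ L, p ∉ v ∧ okCell n arr mn mx p ∧ ∃ d ∈ ds, p = (x.1 + d.1, x.2 + d.2)) ∧
      (∀ d ∈ ds, okCell n arr mn mx (x.1 + d.1, x.2 + d.2) → (x.1 + d.1, x.2 + d.2) ∈ v ++ L) := by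
  intro ds
  induction ds with
  | nil => intro q v; exact ⟨[], by simp, by simp, by simp, by simp⟩
  | cons d ds ih =>
    intro q v
    rw [List.foldl_cons]
    by_cases hc : 0 ≤ x.1 + d.1 ∧ x.1 + d.1 < n ∧ 0 ≤ x.2 + d.2 ∧ x.2 + d.2 < n ∧
        (x.1 + d.1, x.2 + d.2) ∉ v ∧ mn ≤ pvVal arr (x.1 + d.1) (x.2 + d.2) ∧
        pvVal arr (x.1 + d.1) (x.2 + d.2) ≤ mx
    · have hstep : stepA n arr mn mx x (q, v) d
          = (q ++ [(x.1 + d.1, x.2 + d.2)], v ++ [(x.1 + d.1, x.2 + d.2)]) := by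
        simp [stepA, hc]
      obtain ⟨L, hL, hnd, hmem, hcov⟩ :=
        ih (q ++ [(x.1 + d.1, x.2 + d.2)]) (v ++ [(x.1 + d.1, x.2 + d.2)])
      refine ⟨(x.1 + d.1, x.2 + d.2) :: L, ?_, ?_, ?_, ?_⟩
      · rw [hstep, hL]; simp
      · refine List.nodup_cons.mpr ⟨fun hy => ?_, hnd⟩
        exact (hmem _ hy).1 (by simp)
      · intro p hp
        rcases List.mem_cons.mp hp with rfl | hp
        · exact ⟨hc.2.2.2.2.1,
            ⟨hc.1, hc.2.1, hc.2.2.1, hc.2.2.2.1, hc.2.2.2.2.2.1, hc.2.2.2.2.2.2⟩,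
            ⟨d, List.mem_cons_self .., rfl⟩⟩
        · obtain ⟨h1, hok, d', hd', he⟩ := hmem p hp
          exact ⟨fun hv => h1 (List.mem_append_left _ hv), hok,
            ⟨d', List.mem_cons_of_mem _ hd', he⟩⟩
      · intro d' hd' hok
        rcases List.mem_cons.mp hd' with rfl | hd'
        · simp
        · have := hcov d' hd' hok
          simpa [List.append_assoc] using this
    · have hstep : stepA n arr mn mx x (q, v) d = (q, v) := by
        simp only [stepA]
        rw [if_neg]
        exact hc
      obtain ⟨L, hL, hnd, hmem, hcov⟩ := ih q v
      refine ⟨L, by rw [hstep]; exact hL, hnd, ?_, ?_⟩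
      · intro p hp
        obtain ⟨h1, hok, d', hd', he⟩ := hmem p hp
        exact ⟨h1, hok, ⟨d', List.mem_cons_of_mem _ hd', he⟩⟩
      · intro d' hd' hok
        rcases List.mem_cons.mp hd' with rfl | hd'
        · have hyv : (x.1 + d'.1, x.2 + d'.2) ∈ v := by
            by_contra hyv
            exact hc ⟨hok.1, hok.2.1, hok.2.2.1, hok.2.2.2.1, hyv,
              hok.2.2.2.2.1, hok.2.2.2.2.2⟩
          exact List.mem_append_left _ hyv
        · exact hcov d' hd' hok

lemma loopA_true (n : Int) (arr : List (List Int)) (mn mx : Int) :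
    ∀ (f : Nat) (q v : List (Int × Int)),
    loopA n arr mn mx f q v = true →
    (∀ p ∈ v, ReachP n arr mn mx p) → (∀ p ∈ q, p ∈ v) →
    ReachP n arr mn mx (n - 1, n - 1) := by
  intro f
  induction f with
  | zero => intro q v h; simp [loopA] at h
  | succ f ih =>
    intro q v h hv hq
    match q with
    | [] => simp [loopA] at h
    | x :: q =>
      rw [loopA] at h
      by_cases hx : x = (n - 1, n - 1)
      · exact hx ▸ hv x (hq x (List.mem_cons_self ..))
      · rw [if_neg hx] at h
        obtain ⟨L, hL, hnd, hmem, hcov⟩ := foldA_spec n arr mn mx x dirsA q v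
        rw [hL] at h
        refine ih (q ++ L) (v ++ L) h ?_ ?_
        · intro p hp
          rcases List.mem_append.mp hp with hp | hp
          · exact hv p hp
          · obtain ⟨h1, hok, d, hd, rfl⟩ := hmem p hp
            exact ReachP.step (hv x (hq x (List.mem_cons_self ..))) ⟨d, hd, rfl⟩ hok
        · intro p hp
          rcases List.mem_append.mp hp with hp | hp
          · exact List.mem_append_left _ (hq p (List.mem_cons_of_mem _ hp))
          · exact List.mem_append_right _ hp

lemma loopA_false (n : Int) (arr : List (List Int)) (mn mx : Int) :
    ∀ (f : Nat) (q v : List (Int × Int)),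
    loopA n arr mn mx f q v = false →
    (∀ p ∈ q, p ∈ v) → v.Nodup → (∀ p ∈ v, p ∈ cellsB n) →
    (∀ p ∈ v, p ∉ q → ∀ p', AdjP p p' → okCell n arr mn mx p' → p' ∈ v) →
    ((n - 1, n - 1) ∈ v → (n - 1, n - 1) ∈ q) →
    (0, 0) ∈ v →
    mA n v + q.length ≤ f →
    ¬ ReachP n arr mn mx (n - 1, n - 1) := by
  have closed_case : ∀ (v : List (Int × Int)),
      (∀ p ∈ v, ∀ p', AdjP p p' → okCell n arr mn mx p' → p' ∈ v) →
      (0, 0) ∈ v → (n - 1, n - 1) ∉ v → ¬ ReachP n arr mn mx (n - 1, n - 1) := by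
    intro v hcl hz ht hr
    have hall : ∀ p, ReachP n arr mn mx p → p ∈ v := by
      intro p hp
      induction hp with
      | start => exact hz
      | step hp hadj hok ihp => exact hcl _ ihp _ hadj hok
    exact ht (hall _ hr)
  intro f
  induction f with
  | zero =>
    intro q v h hq hnd hgrid hcl htq hz hfuel
    have hq0 : q = [] := by
      cases q with
      | nil => rfl
      | cons a q => simp at hfuel
    subst hq0
    refine closed_case v (fun p hp => hcl p hp (by simp)) hz (fun ht => by simpa using htq ht)
  | succ f ih =>
    intro q v h hq hnd hgrid hcl htq hz hfuel
    match q with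
    | [] =>
      refine closed_case v (fun p hp => hcl p hp (by simp)) hz (fun ht => by simpa using htq ht)
    | x :: q =>
      rw [loopA] at h
      by_cases hx : x = (n - 1, n - 1)
      · rw [if_pos hx] at h; simp at h
      · rw [if_neg hx] at h
        obtain ⟨L, hL, hndL, hmem, hcov⟩ := foldA_spec n arr mn mx x dirsA q v
        rw [hL] at h
        have hLv : ∀ p ∈ L, p ∉ v := fun p hp => (hmem p hp).1
        have hLg : ∀ p ∈ L, p ∈ cellsB n := by
          intro p hp
          have hok := (hmem p hp).2.1
          exact mem_cellsB.mpr ⟨hok.1, hok.2.1, hok.2.2.1, hok.2.2.2.1⟩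
        have hcount := mA_append (n := n) hndL hLv hLg
        refine ih (q ++ L) (v ++ L) h ?_ ?_ ?_ ?_ ?_ ?_ ?_
        · intro p hp
          rcases List.mem_append.mp hp with hp | hp
          · exact List.mem_append_left _ (hq p (List.mem_cons_of_mem _ hp))
          · exact List.mem_append_right _ hp
        · exact List.nodup_append.mpr ⟨hnd, hndL, fun a ha b hb heq => hLv b hb (heq ▸ ha)⟩
        · intro p hp
          rcases List.mem_append.mp hp with hp | hp
          · exact hgrid p hp
          · exact hLg p hp
        · intro p hp hpq p' hadj hok
          rcases List.mem_append.mp hp with hp | hp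
          · by_cases hpx : p ∈ x :: q
            · rcases List.mem_cons.mp hpx with rfl | hpq2
              · obtain ⟨d, hd, rfl⟩ := hadj
                exact hcov d hd hok
              · exact absurd (List.mem_append_left _ hpq2) hpq
            · exact List.mem_append_left _ (hcl p hp hpx p' hadj hok)
          · exact absurd (List.mem_append_right _ hp) hpq
        · intro ht
          rcases List.mem_append.mp ht with ht | ht
          · rcases List.mem_cons.mp (htq ht) with hteq | ht2
            · exact absurd hteq.symm hx
            · exact List.mem_append_left _ ht2
          · exact List.mem_append_right _ ht
        · exact List.mem_append_left _ hz
        · simp only [List.length_append, List.length_cons] at hfuel ⊢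
          omega

lemma mem_addedB {n : Int} {arr : List (List Int)} {mn mx : Int}
    {reach : List (Int × Int)} {p : Int × Int} :
    p ∈ addedB n arr mn mx reach ↔
      p ∈ cellsB n ∧ p ∉ reach ∧ (mn ≤ pvVal arr p.1 p.2 ∧ pvVal arr p.1 p.2 ≤ mx) ∧
      ((p.1, p.2 - 1) ∈ reach ∨ (p.1, p.2 + 1) ∈ reach ∨
       (p.1 - 1, p.2) ∈ reach ∨ (p.1 + 1, p.2) ∈ reach) := by
  simp [addedB, List.mem_filter]

lemma loopB_subset (n : Int) (arr : List (List Int)) (mn mx : Int) :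
    ∀ (f : Nat) (reach : List (Int × Int)) (p : Int × Int),
    p ∈ reach → p ∈ loopB n arr mn mx f reach := by
  intro f
  induction f with
  | zero => intro reach p hp; simpa [loopB] using hp
  | succ f ih =>
    intro reach p hp
    rw [loopB]
    split
    · exact hp
    · exact ih _ _ (List.mem_append_left _ hp)

lemma loopB_sound (n : Int) (arr : List (List Int)) (mn mx : Int) :
    ∀ (f : Nat) (reach : List (Int × Int)),
    (∀ p ∈ reach, ReachP n arr mn mx p) →
    ∀ p ∈ loopB n arr mn mx f reach, ReachP n arr mn mx p := by
  intro f
  induction f with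
  | zero => intro reach hr p hp; exact hr p (by simpa [loopB] using hp)
  | succ f ih =>
    intro reach hr p hp
    rw [loopB] at hp
    split at hp
    · exact hr p hp
    · refine ih (reach ++ addedB n arr mn mx reach) ?_ p hp
      intro a ha
      rcases List.mem_append.mp ha with ha | ha
      · exact hr a ha
      · obtain ⟨hcell, hnin, hval, hnbr⟩ := mem_addedB.mp ha
        obtain ⟨hb1, hb2, hb3, hb4⟩ := mem_cellsB.mp hcell
        have hok : okCell n arr mn mx a := ⟨hb1, hb2, hb3, hb4, hval.1, hval.2⟩
        rcases hnbr with hn | hn | hn | hn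
        · exact ReachP.step (hr _ hn) ⟨(0, 1), by simp [dirsA], by simp⟩ hok
        · exact ReachP.step (hr _ hn) ⟨(0, -1), by simp [dirsA], by simp⟩ hok
        · exact ReachP.step (hr _ hn) ⟨(1, 0), by simp [dirsA], by simp⟩ hok
        · exact ReachP.step (hr _ hn) ⟨(-1, 0), by simp [dirsA], by simp⟩ hok

lemma loopB_fix (n : Int) (arr : List (List Int)) (mn mx : Int) :
    ∀ (f : Nat) (reach : List (Int × Int)),
    mA n reach + 1 ≤ f →
    addedB n arr mn mx (loopB n arr mn mx f reach) = [] := by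
  intro f
  induction f with
  | zero => intro reach hf; omega
  | succ f ih =>
    intro reach hf
    rw [loopB]
    split
    · next hemp => simp [hemp]
    · next hne =>
      refine ih _ ?_
      obtain ⟨p, hp⟩ := List.exists_mem_of_ne_nil _ hne
      obtain ⟨hcell, hnin, -, -⟩ := mem_addedB.mp hp
      have hlt : mA n (reach ++ addedB n arr mn mx reach) < mA n reach := by
        apply Finset.card_lt_card
        constructor
        · intro a ha
          simp only [Finset.mem_sdiff, List.mem_toFinset, List.mem_append] at ha ⊢
          exact ⟨ha.1, fun h => ha.2 (Or.inl h)⟩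
        · intro hsub
          have hp' : p ∈ (cellsB n).toFinset \ reach.toFinset := by
            simp only [Finset.mem_sdiff, List.mem_toFinset]
            exact ⟨hcell, hnin⟩
          have := hsub hp'
          simp only [Finset.mem_sdiff, List.mem_toFinset, List.mem_append] at this
          exact this.2 (Or.inr hp)
      omega

lemma loopB_complete (n : Int) (arr : List (List Int)) (mn mx : Int)
    (R : List (Int × Int)) (hfix : addedB n arr mn mx R = []) (h0 : (0, 0) ∈ R) :
    ∀ p, ReachP n arr mn mx p → p ∈ R := by
  intro p hp
  induction hp with
  | start => exact h0
  | step hp hadj hok ihp =>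
    rename_i a b
    by_cases hb : b ∈ R
    · exact hb
    · exfalso
      have hbadd : b ∈ addedB n arr mn mx R := by
        refine mem_addedB.mpr ⟨mem_cellsB.mpr ⟨hok.1, hok.2.1, hok.2.2.1, hok.2.2.2.1⟩, hb,
          ⟨hok.2.2.2.2.1, hok.2.2.2.2.2⟩, ?_⟩
        obtain ⟨d, hd, rfl⟩ := hadj
        simp only [dirsA, List.mem_cons, List.not_mem_nil, or_false] at hd
        rcases hd with rfl | rfl | rfl | rfl
        · refine Or.inr (Or.inr (Or.inr ?_)); simpa using ihp
        · refine Or.inr (Or.inr (Or.inl ?_)); simpa using ihp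
        · refine Or.inl ?_; simpa using ihp
        · refine Or.inr (Or.inl ?_); simpa using ihp
      rw [hfix] at hbadd
      simp at hbadd

lemma pvVal_zero (arr : List (List Int)) : pvVal arr 0 0 = (arr.headD []).headD 0 := by
  rcases arr with _ | ⟨row, rest⟩
  · decide
  · rcases row with _ | ⟨a, row⟩ <;> simp [pvVal, PySem.List.pyGetD_zero]

lemma pvVal_neg (arr : List (List Int)) (hne : arr ≠ [])
    (hl : arr.getLast?.getD [] ≠ []) :
    pvVal arr (-1) (-1) = (arr.getLast?.getD []).getLast?.getD 0 := by
  have h1 : arr.getLast?.getD [] = arr.getLast hne := by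
    rw [List.getLast?_eq_some_getLast hne]; rfl
  have hl' : arr.getLast hne ≠ [] := h1 ▸ hl
  unfold pvVal
  rw [PySem.List.pyGetD_neg_one arr [] hne, h1, PySem.List.pyGetD_neg_one _ 0 hl',
    List.getLast?_eq_some_getLast hl']
  rfl

-- when Pre_'s guard-failure disjunct holds, the shared endpoint guard is false
lemma pvGuardFalse {arr : List (List Int)} {min_val max_val : Int} (hf : arr ≠ [] ∧ arr.headD [] ≠ [] ∧
      (¬(min_val ≤ (arr.headD []).headD 0 ∧ (arr.headD []).headD 0 ≤ max_val) ∨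
       (arr.getLast?.getD [] ≠ [] ∧
        ¬(min_val ≤ (arr.getLast?.getD []).getLast?.getD 0 ∧
          (arr.getLast?.getD []).getLast?.getD 0 ≤ max_val)))) :
    ¬((min_val ≤ pvVal arr 0 0 ∧ pvVal arr 0 0 ≤ max_val) ∧
      (min_val ≤ pvVal arr (-1) (-1) ∧ pvVal arr (-1) (-1) ≤ max_val)) := by
  obtain ⟨hne, hh, hcase⟩ := hf
  rintro ⟨h0, hL⟩
  rw [pvVal_zero] at h0
  rcases hcase with hout | ⟨hl, hout⟩
  · exact hout h0
  · rw [pvVal_neg arr hne hl] at hL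
    exact hout hL

-- ===== VERDICT (by name: the statement is the Claim_ definition above) =====
theorem bfs_spec : Claim_equal_bfs := by
  intro n arr mn mx hDom hPre
  unfold Spec_bfs bfs bfs_alt
  by_cases hg : (mn ≤ pvVal arr 0 0 ∧ pvVal arr 0 0 ≤ mx) ∧
      (mn ≤ pvVal arr (-1) (-1) ∧ pvVal arr (-1) (-1) ≤ mx)
  · rw [if_pos hg, if_pos hg]
    rcases hPre with ⟨hn, hlen, hrow⟩ | hfail
    swap
    · exact absurd hg (pvGuardFalse hfail)
    have hz_cell : (0, 0) ∈ cellsB n :=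
      mem_cellsB.mpr ⟨le_refl 0, by omega, le_refl 0, by omega⟩
    have hfuel0 : mA n [(0, 0)] + 1 ≤ n.toNat * n.toNat + 1 := by
      have := mA_le n [(0, 0)]; omega
    have hA : (loopA n arr mn mx (n.toNat * n.toNat + 1) [(0, 0)] [(0, 0)] = true) ↔
        ReachP n arr mn mx (n - 1, n - 1) := by
      constructor
      · intro h
        exact loopA_true n arr mn mx _ _ _ h
          (by intro p hp; simp at hp; subst hp; exact ReachP.start) (fun p hp => hp)
      · intro hr
        cases hb : loopA n arr mn mx (n.toNat * n.toNat + 1) [(0, 0)] [(0, 0)] with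
        | true => rfl
        | false =>
          exact absurd hr (loopA_false n arr mn mx _ _ _ hb
            (fun p hp => hp)
            (by simp)
            (by intro p hp; simp at hp; subst hp; exact hz_cell)
            (by intro p hp hpq p' hadj hok; exact absurd hp hpq)
            (fun ht => ht)
            (by simp)
            (by simpa using hfuel0))
    have hB : ((n - 1, n - 1) ∈ loopB n arr mn mx (n.toNat * n.toNat + 1) [(0, 0)]) ↔
        ReachP n arr mn mx (n - 1, n - 1) := by
      constructor
      · intro h
        exact loopB_sound n arr mn mx _ _
          (by intro p hp; simp at hp; subst hp; exact ReachP.start) _ h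
      · intro hr
        exact loopB_complete n arr mn mx _
          (loopB_fix n arr mn mx _ _ hfuel0)
          (loopB_subset n arr mn mx _ _ _ (by simp)) _ hr
    rw [Bool.eq_iff_iff]
    simp only [decide_eq_true_eq]
    exact hA.trans hB.symm
  · rw [if_neg hg, if_neg hg]
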